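-- pv_equiv track=rewrite | github.com/matteosandrin/power-broker-rolodex | pages.py | expand_page_nums
-- ===== SOURCE A (Python) =====
-- def expand_page_nums(page_nums, expand_amount):
--     expanded_page_nums = []
--     for p in page_nums:
--         expanded_page_nums.append(p)
--         for i in range(1, expand_amount+1):
--             expanded_page_nums.append(p + i)
--             expanded_page_nums.append(p - i)
--     expanded_page_nums = list(set(expanded_page_nums))
--     return sorted(expanded_page_nums)
-- ===== SOURCE B (Python) =====
-- def expand_page_nums(page_nums, expand_amount):
--     k = max(expand_amount, 0)
--     result = []
--     prev_hi = None
--     for p in sorted(set(page_nums)):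
--         start = p - k if prev_hi is None else max(p - k, prev_hi + 1)
--         result.extend(range(start, p + k + 1))
--         prev_hi = p + k
--     return result
-- ===== Notes on version B (the rewrite author's own statement) =====
-- stated objective: faster
-- what changed: Instead of materialising every p±i, deduplicating and sorting, B sorts the distinct pages once and emits the union of the [p-k, p+k] intervals in one left-to-right merge pass, so no final sort of the expanded list is needed.
import Mathlib
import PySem

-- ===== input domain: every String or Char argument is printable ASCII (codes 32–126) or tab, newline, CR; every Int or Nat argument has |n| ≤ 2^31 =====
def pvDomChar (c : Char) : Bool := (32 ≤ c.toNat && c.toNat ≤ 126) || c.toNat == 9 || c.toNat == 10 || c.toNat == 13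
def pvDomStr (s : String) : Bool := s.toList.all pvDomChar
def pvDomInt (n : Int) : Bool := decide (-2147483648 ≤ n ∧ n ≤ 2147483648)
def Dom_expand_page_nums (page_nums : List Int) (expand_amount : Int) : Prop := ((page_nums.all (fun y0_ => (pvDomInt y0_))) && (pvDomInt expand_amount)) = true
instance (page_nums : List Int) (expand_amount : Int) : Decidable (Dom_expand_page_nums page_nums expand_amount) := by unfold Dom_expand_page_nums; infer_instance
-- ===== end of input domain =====

-- B replaces "materialise every p±i, dedup, sort" by "sort the distinct pages once and merge the ±k
-- intervals left to right", emitting their union already in order (objective: faster).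

-- ===== PORT A =====
def expand_page_nums (page_nums : List Int) (expand_amount : Int) : List Int :=
  -- for p in page_nums: append p; for i in range(1, expand_amount+1): append p+i; append p-i
  let expanded := page_nums.foldl
    (fun acc p =>
      (PySem.List.pyRange 1 (expand_amount + 1) 1).foldl
        (fun acc2 i => acc2 ++ [p + i] ++ [p - i]) (acc ++ [p]))
    []
  -- sorted(list(set(expanded)))  (sorted of a set with no key: iteration order cannot matter)
  PySem.List.sorted (PySem.Set.ofList expanded) (fun x => x) false

-- ===== PORT B =====
def expand_page_nums_alt (page_nums : List Int) (expand_amount : Int) : List Int :=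
  let k := max expand_amount 0
  let st := (PySem.List.sorted (PySem.Set.ofList page_nums) (fun x => x) false).foldl
    (fun (st : List Int × Option Int) p =>
      let start := match st.2 with
        | none => p - k
        | some h => max (p - k) (h + 1)
      (st.1 ++ PySem.List.pyRange start (p + k + 1) 1, some (p + k)))
    ([], none)
  st.1

-- ===== PRECONDITION & SPEC =====
def Spec_expand_page_nums (page_nums : List Int) (expand_amount : Int) (out : List Int) : Prop := out = expand_page_nums_alt page_nums expand_amount
instance (page_nums : List Int) (expand_amount : Int) (out : List Int) : Decidable (Spec_expand_page_nums page_nums expand_amount out) := by unfold Spec_expand_page_nums; infer_instance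

-- ===== CLAIM (what is proved, stated in full; the proofs are below) =====
def Claim_equal_expand_page_nums : Prop := ∀ (page_nums : List Int) (expand_amount : Int), Dom_expand_page_nums page_nums expand_amount → Spec_expand_page_nums page_nums expand_amount (expand_page_nums page_nums expand_amount)

-- ===== LEMMAS AND PROOFS =====

-- Two strictly increasing Int lists with the same members are equal.
lemma eq_of_pairwise_lt_of_mem_iff (xs ys : List Int)
    (hx : xs.Pairwise (· < ·)) (hy : ys.Pairwise (· < ·))
    (hmem : ∀ x, x ∈ xs ↔ x ∈ ys) : xs = ys := by
  have hnx : xs.Nodup := hx.imp (fun h => ne_of_lt h)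
  have hny : ys.Nodup := hy.imp (fun h => ne_of_lt h)
  have hperm : xs.Perm ys := (List.perm_ext_iff_of_nodup hnx hny).2 hmem
  exact hperm.eq_of_pairwise (fun a b _ _ h1 h2 => absurd h2 (not_lt.2 h1.le)) hx hy

-- Membership in A's expanded list: x is within max(e,0) of some page.
lemma memA (page_nums : List Int) (e : Int) (x : Int) :
    (x ∈ page_nums.foldl
      (fun acc p =>
        (PySem.List.pyRange 1 (e + 1) 1).foldl
          (fun acc2 i => acc2 ++ [p + i] ++ [p - i]) (acc ++ [p]))
      []) ↔ ∃ p ∈ page_nums, p - max e 0 ≤ x ∧ x ≤ p + max e 0 := by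
  have hinner : ∀ (p : Int) (a0 : List Int),
      (PySem.List.pyRange 1 (e + 1) 1).foldl
        (fun acc2 i => acc2 ++ [p + i] ++ [p - i]) a0
      = a0 ++ (PySem.List.pyRange 1 (e + 1) 1).flatMap (fun i => [p + i, p - i]) := by
    intro p a0
    have : (fun (acc2 : List Int) i => acc2 ++ [p + i] ++ [p - i])
        = fun acc2 i => acc2 ++ [p + i, p - i] := by
      funext a i; simp
    rw [this, PySem.List.foldl_append_eq_flatMap]
  have houter : page_nums.foldl
      (fun acc p =>
        (PySem.List.pyRange 1 (e + 1) 1).foldl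
          (fun acc2 i => acc2 ++ [p + i] ++ [p - i]) (acc ++ [p]))
      []
      = page_nums.flatMap (fun p => p :: (PySem.List.pyRange 1 (e + 1) 1).flatMap (fun i => [p + i, p - i])) := by
    have : (fun (acc : List Int) p =>
        (PySem.List.pyRange 1 (e + 1) 1).foldl
          (fun acc2 i => acc2 ++ [p + i] ++ [p - i]) (acc ++ [p]))
        = fun acc p => acc ++ (p :: (PySem.List.pyRange 1 (e + 1) 1).flatMap (fun i => [p + i, p - i])) := by
      funext a p; rw [hinner]; simp
    rw [this, PySem.List.foldl_append_eq_flatMap]; simp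
  rw [houter]
  simp only [List.mem_flatMap, List.mem_cons, PySem.List.mem_pyRange_one]
  constructor
  · rintro ⟨p, hp, h⟩
    refine ⟨p, hp, ?_⟩
    rcases h with h | h
    · omega
    · rcases h with ⟨i, ⟨h1, h2⟩, hi⟩
      simp only [List.not_mem_nil, or_false] at hi
      omega
  · rintro ⟨p, hp, h1, h2⟩
    refine ⟨p, hp, ?_⟩
    by_cases hx : x = p
    · left; exact hx
    · right
      refine ⟨max (x - p) (p - x), by omega, ?_⟩
      simp only [List.not_mem_nil, or_false]
      omega
-- B's merge loop: from a state (res, some h) whose invariant holds, the output stays strictly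
-- increasing and its members are those of res plus everything within k of a remaining page.
lemma memB (k : Int) :
    ∀ (ps res : List Int) (h : Int),
      ps.Pairwise (· < ·) → (∀ p ∈ ps, h - k < p) →
      res.Pairwise (· < ·) → (∀ x ∈ res, x ≤ h) →
      (∀ x, h - 2 * k ≤ x → x ≤ h → x ∈ res) →
      (let out := (ps.foldl
        (fun (st : List Int × Option Int) p =>
          let start := match st.2 with
            | none => p - k
            | some hh => max (p - k) (hh + 1)
          (st.1 ++ PySem.List.pyRange start (p + k + 1) 1, some (p + k)))
        (res, some h)).1
      out.Pairwise (· < ·) ∧ (∀ x, x ∈ out ↔ x ∈ res ∨ ∃ p ∈ ps, p - k ≤ x ∧ x ≤ p + k)) := by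
  intro ps
  induction ps with
  | nil => intro res h _ _ hres hub _; exact ⟨hres, fun x => by simp⟩
  | cons p rest ih =>
    intro res h hpw hgt hres hub hcov
    simp only [List.foldl_cons]
    have hgtp : h - k < p := hgt p (List.mem_cons_self ..)
    set res' := res ++ PySem.List.pyRange (max (p - k) (h + 1)) (p + k + 1) 1 with hres'
    have hmem' : ∀ x, x ∈ res' ↔ x ∈ res ∨ (p - k ≤ x ∧ x ≤ p + k) := by
      intro x
      simp only [hres', List.mem_append, PySem.List.mem_pyRange_one]
      constructor
      · rintro (hx | hx)
        · left; exact hx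
        · right; omega
      · rintro (hx | hx)
        · left; exact hx
        · by_cases hle : max (p - k) (h + 1) ≤ x
          · right; omega
          · left; exact hcov x (by omega) (by omega)
    have hres'pw : res'.Pairwise (· < ·) := by
      rw [hres']
      apply List.pairwise_append.2
      refine ⟨hres, PySem.List.pairwise_lt_pyRange_one .., ?_⟩
      intro a ha b hb
      have := hub a ha
      rw [PySem.List.mem_pyRange_one] at hb
      omega
    have hub' : ∀ x ∈ res', x ≤ p + k := by
      intro x hx
      rw [hmem' x] at hx
      rcases hx with hx | hx
      · have := hub x hx; omega
      · omega
    have hcov' : ∀ x, p + k - 2 * k ≤ x → x ≤ p + k → x ∈ res' := by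
      intro x h1 h2; rw [hmem']; right; omega
    have hrec := ih res' (p + k) (List.pairwise_cons.1 hpw).2
      (fun q hq => by have := (List.pairwise_cons.1 hpw).1 q hq; omega)
      hres'pw hub' hcov'
    simp only at hrec
    refine ⟨hrec.1, fun x => ?_⟩
    rw [hrec.2 x, hmem' x]
    simp only [List.mem_cons]
    constructor
    · rintro ((hx | hx) | hx)
      · left; exact hx
      · right; exact ⟨p, Or.inl rfl, hx⟩
      · rcases hx with ⟨q, hq, hxq⟩; right; exact ⟨q, Or.inr hq, hxq⟩
    · rintro (hx | ⟨q, hq | hq, hxq⟩)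
      · left; left; exact hx
      · subst hq; left; right; exact hxq
      · right; exact ⟨q, hq, hxq⟩

-- ===== VERDICT (by name: the statement is the Claim_ definition above) =====
theorem expand_page_nums_spec : Claim_equal_expand_page_nums := by
  intro page_nums e _
  unfold Spec_expand_page_nums expand_page_nums expand_page_nums_alt
  simp only []
  set k := max e 0 with hk
  -- A side
  apply eq_of_pairwise_lt_of_mem_iff
  · exact PySem.List.sorted_ofList_pairwise_lt _
  · -- B side pairwise
    rcases hsps : PySem.List.sorted (PySem.Set.ofList page_nums) (fun x => x) false with _ | ⟨p, rest⟩
    · simp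
    · have hpw : (p :: rest).Pairwise (· < ·) := by
        rw [← hsps]; exact PySem.List.sorted_ofList_pairwise_lt _
      simp only [List.foldl_cons]
      have := (memB k rest (PySem.List.pyRange (p - k) (p + k + 1) 1) (p + k)
        (List.pairwise_cons.1 hpw).2
        (fun q hq => by have := (List.pairwise_cons.1 hpw).1 q hq; omega)
        (PySem.List.pairwise_lt_pyRange_one ..)
        (fun x hx => by rw [PySem.List.mem_pyRange_one] at hx; omega)
        (fun x h1 h2 => by rw [PySem.List.mem_pyRange_one]; omega)).1
      simpa using this
  · intro x
    rw [PySem.List.mem_sorted, PySem.Set.mem_ofList, memA page_nums e x, ← hk]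
    -- now characterise B's output membership
    rcases hsps : PySem.List.sorted (PySem.Set.ofList page_nums) (fun x => x) false with _ | ⟨p, rest⟩
    · have hempty : page_nums = [] := by
        have : ∀ y, y ∈ page_nums → False := by
          intro y hy
          have : y ∈ PySem.List.sorted (PySem.Set.ofList page_nums) (fun x => x) false := by
            rw [PySem.List.mem_sorted, PySem.Set.mem_ofList]; exact hy
          rw [hsps] at this; simp at this
        cases page_nums with
        | nil => rfl
        | cons a t => exact absurd (this a (List.mem_cons_self ..)) (fun h => h)
      subst hempty; simp
    · have hpw : (p :: rest).Pairwise (· < ·) := by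
        rw [← hsps]; exact PySem.List.sorted_ofList_pairwise_lt _
      simp only [List.foldl_cons]
      have hmemB := (memB k rest (PySem.List.pyRange (p - k) (p + k + 1) 1) (p + k)
        (List.pairwise_cons.1 hpw).2
        (fun q hq => by have := (List.pairwise_cons.1 hpw).1 q hq; omega)
        (PySem.List.pairwise_lt_pyRange_one ..)
        (fun x hx => by rw [PySem.List.mem_pyRange_one] at hx; omega)
        (fun x h1 h2 => by rw [PySem.List.mem_pyRange_one]; omega)).2 x
      have hiff : ∀ q, q ∈ (p :: rest) ↔ q ∈ page_nums := by
        intro q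
        rw [← hsps, PySem.List.mem_sorted, PySem.Set.mem_ofList]
      constructor
      · rintro ⟨q, hq, hxq⟩
        refine hmemB.mpr ?_
        rcases List.mem_cons.mp ((hiff q).2 hq) with hq' | hq'
        · left; rw [PySem.List.mem_pyRange_one]; subst hq'; omega
        · by_cases hin : p - k ≤ x ∧ x ≤ p + k
          · left; rw [PySem.List.mem_pyRange_one]; omega
          · right; exact ⟨q, hq', hxq⟩
      · intro hx
        rcases hmemB.mp hx with hx' | ⟨q, hq, hxq⟩
        · rw [PySem.List.mem_pyRange_one] at hx'
          exact ⟨p, (hiff p).1 (List.mem_cons_self ..), by omega⟩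
        · exact ⟨q, (hiff q).1 (List.mem_cons.mpr (Or.inr hq)), hxq⟩
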